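-- pv_equiv track=rewrite | github.com/HI-JIN2/1day-1solved | 프로그래머스/3/12987. 숫자 게임/숫자 게임.py | solution
-- ===== SOURCE A (Python) =====
-- def solution(A, B):
--     answer = 0
--
--
--     A.sort(reverse = True)
--     B.sort(reverse = True)
--     indexA=0
--     indexB=0
--
--     for i in range(len(A)):
--         if A[indexA]<B[indexB]:
--             indexA+=1
--             indexB+=1
--             answer+=1
--         else:
--             B.pop()
--             indexA+=1
--
--     return answer
-- ===== SOURCE B (Python) =====
-- def solution(A, B):
--     # Sort ascending (no argument mutation); greedily beat the smallest
--     # unbeaten A-value with the smallest sufficient B-value.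
--     As = sorted(A)
--     answer = 0
--     i = 0
--     for b in sorted(B):
--         if i < len(As) and As[i] < b:
--             answer += 1
--             i += 1
--     return answer
-- ===== Notes on version B (the rewrite author's own statement) =====
-- stated objective: simpler
-- what changed: A sorts both lists descending and walks A with two indices while popping B's tail on a loss; B sorts both ascending and makes one pass over B with a single pointer into A, counting whenever the current b beats the smallest unbeaten a (no mutation, no pop, no second index).
import Mathlib
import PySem

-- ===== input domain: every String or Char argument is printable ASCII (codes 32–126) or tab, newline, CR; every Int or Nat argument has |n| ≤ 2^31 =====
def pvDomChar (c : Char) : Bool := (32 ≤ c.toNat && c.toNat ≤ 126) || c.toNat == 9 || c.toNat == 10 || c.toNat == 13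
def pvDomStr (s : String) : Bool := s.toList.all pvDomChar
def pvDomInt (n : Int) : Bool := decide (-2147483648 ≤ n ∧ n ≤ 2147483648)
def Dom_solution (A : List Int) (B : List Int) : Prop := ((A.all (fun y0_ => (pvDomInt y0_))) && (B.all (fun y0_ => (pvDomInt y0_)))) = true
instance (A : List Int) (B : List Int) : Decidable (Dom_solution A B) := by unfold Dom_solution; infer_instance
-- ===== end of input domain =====

-- B sorts ascending and scans B once with one pointer into A instead of A's descending
-- two-index walk with tail pops; equality is about the RETURN value only — the Python A
-- sorts both arguments in place and pops B, while B mutates neither.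

-- ===== PORT A =====
-- loop 'for i in range(len(A))': fuel = number of remaining iterations;
-- state = (current B list, indexA, indexB, answer); none = IndexError.
def solutionGo (As : List Int) : Nat → List Int → Int → Int → Int → Option Int
  | 0, _, _, _, ans => some ans
  | k+1, Bs, iA, iB, ans =>
    match PySem.List.pyGet? As iA, PySem.List.pyGet? Bs iB with
    | some a, some b =>
      if a < b then solutionGo As k Bs (iA+1) (iB+1) (ans+1)
      else
        match PySem.List.pop? Bs with      -- B.pop(), default index -1
        | some p => solutionGo As k p.2 (iA+1) iB ans
        | none => none
    | _, _ => none

def solution (A : List Int) (B : List Int) : Int :=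
  (solutionGo (PySem.List.sorted A (fun x => x) true)
    (PySem.List.sorted A (fun x => x) true).length
    (PySem.List.sorted B (fun x => x) true) 0 0 0).getD 0

-- ===== PORT B =====
-- the guard 's.2 < len' makes the index in range, so pyGetD is exact here
def solution_alt (A : List Int) (B : List Int) : Int :=
  ((PySem.List.sorted B (fun x => x) false).foldl
    (fun (s : Int × Int) b =>
      if s.2 < ((PySem.List.sorted A (fun x => x) false).length : Int) ∧
         PySem.List.pyGetD (PySem.List.sorted A (fun x => x) false) s.2 0 < b
      then (s.1 + 1, s.2 + 1) else s)
    (0, 0)).1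

-- ===== PRECONDITION & SPEC =====
-- Pre_ excludes exactly the inputs on which the Python A raises IndexError
-- (a nonempty A longer than B runs B's index off the shrinking list).
def Pre_solution (A : List Int) (B : List Int) : Prop := A.length ≤ B.length
instance (A : List Int) (B : List Int) : Decidable (Pre_solution A B) := by
  unfold Pre_solution; infer_instance

def pvWitness_solution : List Int × List Int := ([5, 1, 3], [2, 6, 4])

def Spec_solution (A : List Int) (B : List Int) (out : Int) : Prop := out = solution_alt A B
instance (A : List Int) (B : List Int) (out : Int) : Decidable (Spec_solution A B out) := by
  unfold Spec_solution; infer_instance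

-- ===== CLAIM (what is proved, stated in full; the proofs are below) =====
def Claim_equal_solution : Prop := ∀ (A : List Int) (B : List Int), Dom_solution A B → Pre_solution A B → Spec_solution A B (solution A B)

-- ===== LEMMAS AND PROOFS =====

-- B-side core: greedy ascending scan, returning (win count, unused suffix of bs
-- once as is exhausted).
def gp : List Int → List Int → Nat × List Int
  | [], bs => (0, bs)
  | _::_, [] => (0, [])
  | a::as, b::bs => if a < b then ((gp as bs).1 + 1, (gp as bs).2) else gp (a::as) bs

-- A-side core: greedy descending match (lists descending).
def fc : List Int → List Int → Nat
  | [], _ => 0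
  | _::_, [] => 0
  | a::as, b::bs => if a < b then fc as bs + 1 else fc as (b::bs)

theorem gp_count_le : ∀ as bs : List Int, (gp as bs).1 ≤ as.length := by
  intro as bs
  induction bs generalizing as with
  | nil => cases as <;> simp [gp]
  | cons b bs ih =>
    cases as with
    | nil => simp [gp]
    | cons a as =>
      by_cases h : a < b
      · simpa [gp, h, Nat.succ_le_succ_iff] using ih as
      · exact le_trans (by simpa [gp, h] using ih (a::as)) (le_refl _)

theorem gp_leftover_mem : ∀ as bs : List Int, ∀ x ∈ (gp as bs).2, x ∈ bs := by
  intro as bs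
  induction bs generalizing as with
  | nil => cases as <;> simp [gp]
  | cons b bs ih =>
    cases as with
    | nil => simp [gp]
    | cons a as =>
      by_cases h : a < b
      · intro x hx
        simp only [gp, if_pos h] at hx
        exact List.mem_cons_of_mem _ (ih as x hx)
      · intro x hx
        simp only [gp, if_neg h] at hx
        exact List.mem_cons_of_mem _ (ih (a::as) x hx)

theorem gp_leftover_ne_nil : ∀ as bs : List Int, (gp as bs).2 ≠ [] → (gp as bs).1 = as.length := by
  intro as bs
  induction bs generalizing as with
  | nil => cases as <;> simp [gp]
  | cons b bs ih =>
    cases as with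
    | nil => simp [gp]
    | cons a as =>
      by_cases h : a < b
      · intro hne
        simp only [gp, if_pos h] at hne ⊢
        simp [ih as hne]
      · intro hne
        simp only [gp, if_neg h] at hne ⊢
        exact ih (a::as) hne

-- snoc on the A side: appending one more (largest) a can add at most one win,
-- taken from the leftover suffix.
theorem gp_snoc_as : ∀ bs as : List Int, ∀ x : Int,
    gp (as ++ [x]) bs =
      if (gp as bs).2.dropWhile (fun b => decide (b ≤ x)) = []
      then ((gp as bs).1, ([] : List Int))
      else ((gp as bs).1 + 1, ((gp as bs).2.dropWhile (fun b => decide (b ≤ x))).tail) := by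
  intro bs
  induction bs with
  | nil =>
    intro as x
    cases as <;> simp [gp]
  | cons b bs ih =>
    intro as x
    cases as with
    | nil =>
      simp only [List.nil_append]
      by_cases h : x < b
      · have hd : ¬ (b ≤ x) := not_le.mpr h
        simp [gp, h, List.dropWhile, hd]
      · have hd : b ≤ x := not_lt.mp h
        have := ih [] x
        simp only [List.nil_append] at this
        simp only [gp, if_neg h, this]
        simp [List.dropWhile, hd]
    | cons a as =>
      by_cases h : a < b
      · have := ih as x
        simp only [List.cons_append, gp, if_pos h, this]
        by_cases hr : ((gp as bs).2.dropWhile (fun b => decide (b ≤ x))) = [] <;>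
          simp [hr]
      · have := ih (a::as) x
        simp only [List.cons_append, gp, if_neg h]
        exact this

-- snoc on the B side: appending one more (largest) b matches the first
-- still-unmatched a, if any.
theorem gp_snoc_bs : ∀ bs as : List Int, ∀ y : Int,
    gp as (bs ++ [y]) =
      (match as.drop (gp as bs).1 with
       | [] => ((gp as bs).1, (gp as bs).2 ++ [y])
       | a::_ => if a < y then ((gp as bs).1 + 1, ([] : List Int))
                 else ((gp as bs).1, ([] : List Int))) := by
  intro bs
  induction bs with
  | nil =>
    intro as y
    cases as with
    | nil => simp [gp]
    | cons a as =>
      by_cases h : a < y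
      · have h0 : gp (a::as) [] = (0, ([] : List Int)) := by simp [gp]
        have h1 : gp as [] = (0, ([] : List Int)) := by cases as <;> simp [gp]
        simp [gp, h, h0, h1]
      · simp [gp, h]
  | cons b bs ih =>
    intro as y
    cases as with
    | nil => simp [gp]
    | cons a as =>
      by_cases h : a < b
      · have := ih as y
        simp only [List.cons_append, gp, if_pos h, this, List.drop_succ_cons]
        cases hdr : as.drop (gp as bs).1 with
        | nil => simp
        | cons a' t => by_cases h' : a' < y <;> simp [h']
      · have := ih (a::as) y
        simp only [List.cons_append, gp, if_neg h]
        exact this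

-- fc only looks at the first k ≥ |as| elements of bs
theorem fc_take : ∀ as bs : List Int, ∀ k : Nat, as.length ≤ k → fc as bs = fc as (bs.take k) := by
  intro as
  induction as with
  | nil => intro bs k _; cases bs <;> simp [fc]
  | cons a as ih =>
    intro bs k hk
    cases bs with
    | nil => simp
    | cons b bs =>
      obtain ⟨k', rfl⟩ : ∃ k', k = k' + 1 := ⟨k - 1, by simp at hk; omega⟩
      simp only [List.take_succ_cons]
      by_cases h : a < b
      · simp only [fc, if_pos h]
        rw [ih bs k' (by simp at hk; omega)]
      · simp only [fc, if_neg h]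
        rw [ih (b::bs) (k'+1) (by simp at hk; omega)]
        simp only [List.take_succ_cons]

theorem fc_dropLast (as bs : List Int) (h : as.length + 1 ≤ bs.length) :
    fc as bs.dropLast = fc as bs := by
  rw [List.dropLast_eq_take]
  rw [← fc_take as bs (bs.length - 1) (by omega)]

-- all elements of a ≤-pairwise snoc list are ≤ the last element
theorem pairwise_snoc_le {l : List Int} {x : Int}
    (h : (l ++ [x]).Pairwise (fun a b => a ≤ b)) : ∀ a ∈ l ++ [x], a ≤ x := by
  rw [List.pairwise_append] at h
  intro a ha
  rcases List.mem_append.mp ha with ha | ha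
  · exact h.2.2 a ha x (by simp)
  · simp at ha; omega

-- MAIN: greedy descending (fc on the reversed lists) = greedy ascending (gp)
theorem fc_rev_eq_gp : ∀ n : Nat, ∀ as bs : List Int,
    as.length + bs.length = n →
    as.Pairwise (fun a b => a ≤ b) → bs.Pairwise (fun a b => a ≤ b) →
    as.length ≤ bs.length →
    fc as.reverse bs.reverse = (gp as bs).1 := by
  intro n
  induction n using Nat.strong_induction_on with
  | _ n ih =>
    intro as bs hn hsa hsb hlen
    rcases List.eq_nil_or_concat' as with rfl | ⟨as₀, x, rfl⟩
    · cases bs <;> simp [fc, gp]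
    · have hbne : bs ≠ [] := by
        intro h; subst h; simp at hlen
      rcases List.eq_nil_or_concat' bs with rfl | ⟨bs₀, y, rfl⟩
      · exact absurd rfl hbne
      have hsa₀ : as₀.Pairwise (fun a b => a ≤ b) :=
        (List.pairwise_append.mp hsa).1
      have hsb₀ : bs₀.Pairwise (fun a b => a ≤ b) :=
        (List.pairwise_append.mp hsb).1
      have hlx : ∀ a ∈ as₀ ++ [x], a ≤ x := pairwise_snoc_le hsa
      have hly : ∀ b ∈ bs₀ ++ [y], b ≤ y := pairwise_snoc_le hsb
      simp only [List.reverse_append, List.reverse_cons, List.reverse_nil,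
        List.nil_append, List.singleton_append]
      by_cases hxy : x < y
      · -- heads of the reversed lists match: both counts are one more
        have hrec : fc (x :: as₀.reverse) (y :: bs₀.reverse) =
            fc as₀.reverse bs₀.reverse + 1 := by simp [fc, hxy]
        have hlen₀ : as₀.length ≤ bs₀.length := by
          simp at hlen; omega
        have hih := ih (as₀.length + bs₀.length) (by simp at hn; omega)
          as₀ bs₀ rfl hsa₀ hsb₀ hlen₀
        rw [hrec, hih]
        by_cases hr : (gp as₀ bs₀).2.dropWhile (fun b => decide (b ≤ x)) = []
        · -- x not matched by bs₀: some a is still unmatched, and y beats it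
          have gA : gp (as₀ ++ [x]) bs₀ = ((gp as₀ bs₀).1, ([] : List Int)) := by
            rw [gp_snoc_as]; simp [hr]
          have hc : (gp as₀ bs₀).1 ≤ as₀.length := gp_count_le as₀ bs₀
          obtain ⟨a, t, hdr⟩ : ∃ a t, (as₀ ++ [x]).drop (gp as₀ bs₀).1 = a :: t := by
            cases hdr : (as₀ ++ [x]).drop (gp as₀ bs₀).1 with
            | nil =>
              have := List.drop_eq_nil_iff.mp hdr
              simp at this; omega
            | cons a t => exact ⟨a, t, rfl⟩
          have hamem : a ∈ as₀ ++ [x] := by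
            have : a ∈ (as₀ ++ [x]).drop (gp as₀ bs₀).1 := by rw [hdr]; simp
            exact List.mem_of_mem_drop this
          have hay : a < y := lt_of_le_of_lt (hlx a hamem) hxy
          rw [gp_snoc_bs, gA]
          simp only [hdr]
          simp [hay]
        · -- bs₀ already matched all of as₀ ++ [x]
          have hfull : (gp as₀ bs₀).1 = as₀.length := by
            apply gp_leftover_ne_nil
            intro h0; rw [h0] at hr; simp [List.dropWhile] at hr
          have gA1 : (gp (as₀ ++ [x]) bs₀).1 = (gp as₀ bs₀).1 + 1 := by
            rw [gp_snoc_as]; simp [hr]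
          have hdr : (as₀ ++ [x]).drop ((gp (as₀ ++ [x]) bs₀).1) = [] := by
            apply List.drop_eq_nil_iff.mpr
            rw [gA1, hfull]; simp
          rw [gp_snoc_bs]
          simp only [hdr]
          simp [gA1]
      · -- x ≥ y beats nothing: both sides ignore x
        have hyx : y ≤ x := not_lt.mp hxy
        have hrec : fc (x :: as₀.reverse) (y :: bs₀.reverse) =
            fc as₀.reverse (y :: bs₀.reverse) := by simp [fc, hxy]
        have hlen₀ : as₀.length ≤ (bs₀ ++ [y]).length := by
          simp at hlen ⊢; omega
        have hih := ih (as₀.length + (bs₀ ++ [y]).length) (by simp at hn ⊢; omega)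
          as₀ (bs₀ ++ [y]) rfl hsa₀ hsb hlen₀
        simp only [List.reverse_append, List.reverse_cons, List.reverse_nil,
          List.nil_append, List.singleton_append] at hih
        rw [hrec, hih]
        have hr : ((gp as₀ (bs₀ ++ [y])).2.dropWhile (fun b => decide (b ≤ x))) = [] := by
          apply List.dropWhile_eq_nil_iff.mpr
          intro b hb
          have hmem := gp_leftover_mem as₀ (bs₀ ++ [y]) b hb
          have := hly b hmem
          simp; omega
        rw [gp_snoc_as]
        simp [hr]

-- ===== port A = fc =====

theorem solutionGo_eq_fc : ∀ (k : Nat) (As Bs : List Int) (iA iB : Nat) (ans : Int),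
    k = As.length - iA → iA ≤ As.length → iB ≤ Bs.length →
    As.length - iA ≤ Bs.length - iB →
    solutionGo As k Bs (iA : Int) (iB : Int) ans =
      some (ans + (fc (As.drop iA) (Bs.drop iB) : Int)) := by
  intro k
  induction k with
  | zero =>
    intro As Bs iA iB ans hk hA hB hw
    have : As.drop iA = [] := List.drop_eq_nil_iff.mpr (by omega)
    simp [solutionGo, this, fc]
  | succ k ihk =>
    intro As Bs iA iB ans hk hA hB hw
    have hiA : iA < As.length := by omega
    have hiB : iB < Bs.length := by omega
    have hga : PySem.List.pyGet? As (iA : Int) = some As[iA] := by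
      rw [PySem.List.pyGet?_natCast]; simp [hiA]
    have hgb : PySem.List.pyGet? Bs (iB : Int) = some Bs[iB] := by
      rw [PySem.List.pyGet?_natCast]; simp [hiB]
    have hdA : As.drop iA = As[iA] :: As.drop (iA + 1) :=
      List.drop_eq_getElem_cons hiA
    have hdB : Bs.drop iB = Bs[iB] :: Bs.drop (iB + 1) :=
      List.drop_eq_getElem_cons hiB
    simp only [solutionGo, hga, hgb]
    by_cases h : As[iA] < Bs[iB]
    · rw [if_pos h]
      have hrec := ihk As Bs (iA+1) (iB+1) (ans+1) (by omega) (by omega) (by omega) (by omega)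
      push_cast at hrec ⊢
      rw [hrec, hdA, hdB]
      simp only [fc, if_pos h]
      push_cast
      ring
    · rw [if_neg h]
      obtain ⟨B₀, yl, hBs⟩ : ∃ B₀ yl, Bs = B₀ ++ [yl] := by
        rcases List.eq_nil_or_concat' Bs with h0 | ⟨B₀, yl, h0⟩
        · subst h0; simp at hiB
        · exact ⟨B₀, yl, h0⟩
      have hpop : PySem.List.pop? Bs = some (yl, B₀) := by
        rw [hBs]; exact PySem.List.pop?_last B₀ yl
      have hB₀ : B₀ = Bs.dropLast := by rw [hBs]; simp
      have hlenB₀ : B₀.length = Bs.length - 1 := by rw [hBs]; simp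
      rw [hpop]
      have hrec := ihk As B₀ (iA+1) iB ans (by omega) (by omega) (by omega) (by omega)
      push_cast at hrec ⊢
      rw [hrec]
      have hcomm : B₀.drop iB = (Bs.drop iB).dropLast := by
        rw [hB₀, List.dropLast_eq_take, List.dropLast_eq_take, List.drop_take]
        congr 1
        simp only [List.length_drop]
        omega
      have h1 : fc (As.drop iA) (Bs.drop iB) = fc (As.drop (iA+1)) (Bs.drop iB) := by
        rw [hdA, hdB]; simp [fc, h]
      have h2 : fc (As.drop (iA+1)) (B₀.drop iB) = fc (As.drop (iA+1)) (Bs.drop iB) := by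
        rw [hcomm]
        apply fc_dropLast
        simp only [List.length_drop]
        omega
      rw [h2, ← h1]

-- ===== port B = gp =====

theorem foldB_eq_gp : ∀ (bs As : List Int) (ans : Int) (i : Nat),
    bs.foldl
      (fun (s : Int × Int) b =>
        if s.2 < (As.length : Int) ∧ PySem.List.pyGetD As s.2 0 < b
        then (s.1 + 1, s.2 + 1) else s)
      (ans, (i : Int)) =
    (ans + ((gp (As.drop i) bs).1 : Int), (i : Int) + ((gp (As.drop i) bs).1 : Int)) := by
  intro bs
  induction bs with
  | nil =>
    intro As ans i
    cases h : As.drop i <;> simp [gp, h]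
  | cons b bs ih =>
    intro As ans i
    by_cases hi : i < As.length
    · have hdA : As.drop i = As[i] :: As.drop (i + 1) :=
        List.drop_eq_getElem_cons hi
      have hget : PySem.List.pyGetD As (i : Int) 0 = As[i] := by
        rw [PySem.List.pyGetD_natCast]; simp [hi]
      by_cases h : As[i] < b
      · have hcond : ((i : Int) < (As.length : Int) ∧ PySem.List.pyGetD As (i : Int) 0 < b) := by
          constructor
          · exact_mod_cast hi
          · rw [hget]; exact h
        simp only [List.foldl_cons, if_pos hcond]
        have hcast : ((i : Int) + 1) = ((i + 1 : Nat) : Int) := by push_cast; ring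
        rw [hcast, ih As (ans + 1) (i+1), hdA]
        simp only [gp, if_pos h]
        simp only [Prod.mk.injEq]; push_cast; omega
      · have hcond : ¬ ((i : Int) < (As.length : Int) ∧ PySem.List.pyGetD As (i : Int) 0 < b) := by
          rw [hget]
          push_neg
          intro _; exact not_lt.mp h
        simp only [List.foldl_cons, if_neg hcond]
        rw [ih As ans i, hdA]
        simp only [gp, if_neg h]
    · have hd : As.drop i = [] := List.drop_eq_nil_iff.mpr (by omega)
      have hcond : ¬ ((i : Int) < (As.length : Int) ∧ PySem.List.pyGetD As (i : Int) 0 < b) := by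
        push_neg
        intro hlt
        exfalso
        exact hi (by exact_mod_cast hlt)
      simp only [List.foldl_cons, if_neg hcond]
      rw [ih As ans i, hd]
      simp [gp]

-- descending sort = reverse of ascending sort (lists of Ints, identity key)
theorem sorted_rev_eq_reverse (xs : List Int) :
    PySem.List.sorted xs (fun x => x) true = (PySem.List.sorted xs (fun x => x) false).reverse := by
  apply List.eq_of_perm_of_sorted (le := fun a b : Int => b ≤ a)
  · intro a b _ _ h1 h2; omega
  · exact PySem.List.sorted_pairwise_rev xs (fun x => x)
  · rw [List.pairwise_reverse]
    exact PySem.List.sorted_pairwise xs (fun x => x)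
  · exact (PySem.List.sorted_perm xs (fun x => x) true).trans
      ((PySem.List.sorted_perm xs (fun x => x) false).symm.trans (List.reverse_perm _).symm)

-- ===== VERDICT (by name: the statement is the Claim_ definition above) =====
theorem solution_spec : Claim_equal_solution := by
  intro A B _ hpre
  unfold Spec_solution solution solution_alt
  have hAdesc := sorted_rev_eq_reverse A
  have hBdesc := sorted_rev_eq_reverse B
  rw [hAdesc, hBdesc]
  have hlen : (PySem.List.sorted A (fun x => x) false).length ≤
      (PySem.List.sorted B (fun x => x) false).length := by
    rw [PySem.List.length_sorted, PySem.List.length_sorted]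
    exact hpre
  have hgo := solutionGo_eq_fc (PySem.List.sorted A (fun x => x) false).reverse.length
    (PySem.List.sorted A (fun x => x) false).reverse
    (PySem.List.sorted B (fun x => x) false).reverse 0 0 0
    (by omega) (by omega) (by omega) (by simp only [List.length_reverse]; omega)
  simp only [Nat.cast_zero, List.drop_zero, zero_add] at hgo
  rw [hgo]
  simp only [Option.getD_some]
  have hfold := foldB_eq_gp (PySem.List.sorted B (fun x => x) false)
    (PySem.List.sorted A (fun x => x) false) 0 0
  have hfold1 := congrArg Prod.fst hfold
  simp only [Nat.cast_zero, List.drop_zero, zero_add] at hfold1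
  rw [hfold1]
  have := fc_rev_eq_gp
    ((PySem.List.sorted A (fun x => x) false).length + (PySem.List.sorted B (fun x => x) false).length)
    (PySem.List.sorted A (fun x => x) false) (PySem.List.sorted B (fun x => x) false) rfl
    (PySem.List.sorted_pairwise A (fun x => x)) (PySem.List.sorted_pairwise B (fun x => x)) hlen
  exact_mod_cast this
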